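-- pv_equiv track=rewrite | github.com/ydocsgnillats/googleFoobar | solution2.2.py | stingy
-- ===== SOURCE A (Python) =====
-- def stingy(x):
--     current = 1
--     next = 1
--     total = 0
--     count = 0
--
--     #determines the maximum number of henchmen that can be paid, using the stingiest method
--     while total + current <= x:
--         total = total + current
--         temp = next
--         next = temp + current
--         current = temp
--         count = count+1
--     return count
-- ===== SOURCE B (Python) =====
-- def stingy(x):
--     # count Fibonacci numbers a=F(k) with a <= x+1; the cumulative sum of the
--     # first n Fibonacci terms is F(n+2)-1, so the answer is that count minus 2
--     a, b = 1, 1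
--     count = 0
--     while a <= x + 1:
--         a, b = b, a + b
--         count += 1
--     return max(0, count - 2)
-- ===== Notes on version B (the rewrite author's own statement) =====
-- stated objective: alternative
-- what changed: B drops A's running-total loop: using the prefix-sum identity for Fibonacci numbers, it counts Fibonacci numbers below the shifted threshold with only the Fibonacci pair and a counter, then clamps the count to be non-negative after subtracting the two initial terms.
import Mathlib
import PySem

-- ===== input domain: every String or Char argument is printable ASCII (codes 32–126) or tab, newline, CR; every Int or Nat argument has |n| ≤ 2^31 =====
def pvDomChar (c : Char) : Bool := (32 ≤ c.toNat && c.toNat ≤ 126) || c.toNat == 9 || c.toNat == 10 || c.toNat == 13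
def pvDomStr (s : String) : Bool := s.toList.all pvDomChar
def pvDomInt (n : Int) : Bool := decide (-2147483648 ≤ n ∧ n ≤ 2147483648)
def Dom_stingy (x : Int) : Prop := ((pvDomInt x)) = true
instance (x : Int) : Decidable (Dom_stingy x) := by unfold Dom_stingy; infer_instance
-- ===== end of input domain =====

-- B counts Fibonacci numbers ≤ x+1 instead of maintaining A's running total; same value everywhere.

-- ===== PORT A =====
-- A's while loop; the extra 0 < current conjunct is a totality guard only (current ≥ 1 on every reachable state).
def stingyLoopA (x current next total count : Int) : Int :=
  if _h : total + current ≤ x ∧ 0 < current then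
    stingyLoopA x next (next + current) (total + current) (count + 1)
  else count
termination_by (x - total).toNat
decreasing_by omega

def stingy (x : Int) : Int := stingyLoopA x 1 1 0 0

-- ===== PORT B =====
-- B's while loop; the 0 < a ∧ 0 < b conjuncts are totality guards only (always true on reachable states).
def stingyLoopB (x a b count : Int) : Int :=
  if _h : a ≤ x + 1 ∧ 0 < a ∧ 0 < b then
    stingyLoopB x b (a + b) (count + 1)
  else count
termination_by ((x + 2 - a).toNat + (x + 2 - b).toNat)
decreasing_by omega

def stingy_alt (x : Int) : Int := max 0 (stingyLoopB x 1 1 0 - 2)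

-- ===== PRECONDITION & SPEC =====
def Spec_stingy (x : Int) (out : Int) : Prop := out = stingy_alt x
instance (x : Int) (out : Int) : Decidable (Spec_stingy x out) := by unfold Spec_stingy; infer_instance

-- ===== CLAIM (what is proved, stated in full; the proofs are below) =====
def Claim_equal_stingy : Prop := ∀ (x : Int), Dom_stingy x → Spec_stingy x (stingy x)

-- ===== LEMMAS AND PROOFS =====

-- the count-argument is a lower bound on loopA's result
theorem stingyLoopA_ge (x current next total count : Int) :
    count ≤ stingyLoopA x current next total count := by
  fun_induction stingyLoopA with
  | case1 c n t k h ih => omega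
  | case2 c n t k h => omega

-- the core correspondence: at Fibonacci states, B's loop (two counts ahead) equals A's loop plus 2.
theorem stingy_key (x : Int) :
    ∀ (n k : ℕ), (x + 2 - (Nat.fib (k+3) : Int)).toNat ≤ n →
    stingyLoopB x (Nat.fib (k+3) : Int) (Nat.fib (k+4) : Int) ((k : Int) + 2)
      = stingyLoopA x (Nat.fib (k+1) : Int) (Nat.fib (k+2) : Int) ((Nat.fib (k+2) : Int) - 1) (k : Int) + 2 := by
  intro n
  induction n with
  | zero =>
    intro k hn
    have h3 : Nat.fib (k+1+2) = Nat.fib (k+1) + Nat.fib (k+2) := Nat.fib_add_two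
    have hp1 : 0 < Nat.fib (k+1) := Nat.fib_pos.mpr (by omega)
    rw [stingyLoopB, stingyLoopA]
    rw [dif_neg (by push_cast [h3] at hn ⊢; omega), dif_neg (by push_cast [h3] at hn ⊢; omega)]
  | succ n ih =>
    intro k hn
    have h3 : Nat.fib (k+1+2) = Nat.fib (k+1) + Nat.fib (k+2) := Nat.fib_add_two
    have h4 : Nat.fib (k+2+2) = Nat.fib (k+2) + Nat.fib (k+3) := Nat.fib_add_two
    have hp1 : 0 < Nat.fib (k+1) := Nat.fib_pos.mpr (by omega)
    have hp2 : 0 < Nat.fib (k+2) := Nat.fib_pos.mpr (by omega)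
    have hp3 : 0 < Nat.fib (k+3) := Nat.fib_pos.mpr (by omega)
    have hp4 : 0 < Nat.fib (k+4) := Nat.fib_pos.mpr (by omega)
    by_cases hg : (Nat.fib (k+3) : Int) ≤ x + 1
    · rw [stingyLoopB, stingyLoopA]
      rw [dif_pos (by omega), dif_pos (by push_cast [h3] at hg ⊢; omega)]
      have e1 : (Nat.fib (k+3) : Int) + (Nat.fib (k+4) : Int) = (Nat.fib (k+5) : Int) := by
        have : Nat.fib (k+3+2) = Nat.fib (k+3) + Nat.fib (k+4) := Nat.fib_add_two
        push_cast [this]; ring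
      have e2 : (Nat.fib (k+1) : Int) + (Nat.fib (k+2) : Int) = (Nat.fib (k+3) : Int) := by
        push_cast [h3]; ring
      have ihk := ih (k+1) (by push_cast [h4] at hn ⊢; omega)
      push_cast at ihk
      calc stingyLoopB x (Nat.fib (k+4) : Int) ((Nat.fib (k+3) : Int) + (Nat.fib (k+4) : Int)) ((k : Int) + 2 + 1)
          = stingyLoopB x (Nat.fib (k+4) : Int) (Nat.fib (k+5) : Int) (((k:Int)+1) + 2) := by rw [e1]; ring_nf
        _ = stingyLoopA x (Nat.fib (k+2) : Int) (Nat.fib (k+3) : Int) ((Nat.fib (k+3) : Int) - 1) ((k:Int)+1) + 2 := by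
              exact_mod_cast ihk
        _ = stingyLoopA x (Nat.fib (k+2) : Int) ((Nat.fib (k+2) : Int) + (Nat.fib (k+1) : Int)) ((Nat.fib (k+2) : Int) - 1 + (Nat.fib (k+1) : Int)) ((k:Int) + 1) + 2 := by
              rw [← e2]; ring_nf
    · rw [stingyLoopB, stingyLoopA]
      rw [dif_neg (by omega), dif_neg (by push_cast [h3] at hg ⊢; omega)]

-- ===== VERDICT (by name: the statement is the Claim_ definition above) =====
theorem stingy_spec : Claim_equal_stingy := by
  intro x _
  unfold Spec_stingy stingy stingy_alt
  by_cases hx : 0 ≤ x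
  · have b1 : stingyLoopB x 1 1 0 = stingyLoopB x 1 2 1 := by
      rw [stingyLoopB]; rw [dif_pos (by omega)]; norm_num
    have b2 : stingyLoopB x 1 2 1 = stingyLoopB x 2 3 2 := by
      rw [stingyLoopB]; rw [dif_pos (by omega)]; norm_num
    have key := stingy_key x (x + 2 - (Nat.fib 3 : Int)).toNat 0 (le_refl _)
    norm_num [Nat.fib] at key
    have hge := stingyLoopA_ge x 1 1 0 0
    omega
  · have hb : stingyLoopB x 1 1 0 = 0 := by rw [stingyLoopB]; rw [dif_neg (by omega)]
    have ha : stingyLoopA x 1 1 0 0 = 0 := by rw [stingyLoopA]; rw [dif_neg (by omega)]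
    rw [ha, hb]; omega
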